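-- pv_equiv track=rewrite | github.com/Tanmay-Patel-21/dsa | interviews/shreya1.py | is_hard_word
-- ===== SOURCE A (Python) =====
-- def is_hard_word(word):
--     vowels = "aeiouAEIOU"
--     consecutive_consonants_count = 0
--     consonants_count = 0
--
--     for char in word:
--         if char.isalpha():
--             if char not in vowels:
--                 consonants_count += 1
--                 consecutive_consonants_count += 1
--                 if consecutive_consonants_count == 3:
--                     return True
--             else:
--                 consecutive_consonants_count = 0
--
--     return consonants_count > len(word) - consonants_count
-- ===== SOURCE B (Python) =====
-- def is_hard_word(word):
--     vowels = "aeiouAEIOU"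
--     flags = ''.join('v' if c in vowels else 'c' for c in word if c.isalpha())
--     if 'ccc' in flags:
--         return True
--     consonants = flags.count('c')
--     return consonants > len(word) - consonants
-- ===== Notes on version B (the rewrite author's own statement) =====
-- stated objective: idiomatic
-- what changed: Replaces A's single incremental loop with an early-exit consecutive-consonant counter by a two-phase pipeline: build a consonant/vowel flag string over the alphabetic characters, return True if it contains a three-consonant run as a substring, otherwise count the consonant flags and compare against the full word length.
import Mathlib
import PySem

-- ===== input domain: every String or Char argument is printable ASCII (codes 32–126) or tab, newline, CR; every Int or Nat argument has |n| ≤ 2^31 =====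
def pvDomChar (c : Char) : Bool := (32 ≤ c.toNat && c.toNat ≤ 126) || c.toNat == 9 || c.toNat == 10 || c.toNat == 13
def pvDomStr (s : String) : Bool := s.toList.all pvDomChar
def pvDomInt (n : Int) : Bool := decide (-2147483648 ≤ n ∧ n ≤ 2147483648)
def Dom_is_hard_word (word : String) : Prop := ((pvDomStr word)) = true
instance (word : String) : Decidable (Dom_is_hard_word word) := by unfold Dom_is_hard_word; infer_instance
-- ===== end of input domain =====

-- B replaces A's incremental early-exit counter loop by a two-phase pipeline: build a
-- consonant/vowel flag string over the alphabetic characters, test 'ccc' as a substring,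
-- else count consonants (objective: idiomatic; same return value).

-- ===== PORT A =====
-- vowels = "aeiouAEIOU" as a char list (ASCII)
def pvVowels : List Char := ['a', 'e', 'i', 'o', 'u', 'A', 'E', 'I', 'O', 'U']

-- A's for-loop: state = (consecutive_consonants_count, consonants_count), early return True;
-- 'char not in vowels' is Python substring-membership of a 1-char string, ported as Chars.isIn
def goA (n : Int) : List Char → Int → Int → Bool
  | [], _, cons => decide (cons > n - cons)
  | ch :: rest, cc, cons =>
    if PySem.Chars.isalpha ch then
      if !(PySem.Chars.isIn [ch] pvVowels) then
        if cc + 1 == 3 then true else goA n rest (cc + 1) (cons + 1)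
      else goA n rest 0 cons
    else goA n rest cc cons

def is_hard_word (word : String) : Bool :=
  goA (word.toList.length : Int) word.toList 0 0

-- ===== PORT B =====
-- 'v' if c in vowels else 'c'
def pvFlag (c : Char) : Char := if PySem.Chars.isIn [c] pvVowels then 'v' else 'c'

def is_hard_word_alt (word : String) : Bool :=
  let flags : List Char := (word.toList.filter PySem.Chars.isalpha).map pvFlag
  if PySem.Chars.isIn ['c', 'c', 'c'] flags then true
  else
    let consonants : Int := (PySem.Chars.count flags ['c'] : Int)
    decide (consonants > (word.toList.length : Int) - consonants)

-- ===== PRECONDITION & SPEC =====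
def Spec_is_hard_word (word : String) (out : Bool) : Prop := out = is_hard_word_alt word
instance (word : String) (out : Bool) : Decidable (Spec_is_hard_word word out) := by unfold Spec_is_hard_word; infer_instance

-- ===== CLAIM (what is proved, stated in full; the proofs are below) =====
def Claim_equal_is_hard_word : Prop := ∀ (word : String), Dom_is_hard_word word → Spec_is_hard_word word (is_hard_word word)

-- ===== LEMMAS AND PROOFS =====

-- flag string of a char list (B's intermediate value)
def pvF (xs : List Char) : List Char := (xs.filter PySem.Chars.isalpha).map pvFlag

lemma pvF_cons_alpha {x : Char} (xs : List Char) (ha : PySem.Chars.isalpha x = true) :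
    pvF (x :: xs) = pvFlag x :: pvF xs := by
  simp [pvF, ha]

lemma pvF_cons_not_alpha {x : Char} (xs : List Char) (ha : ¬ PySem.Chars.isalpha x = true) :
    pvF (x :: xs) = pvF xs := by
  simp [pvF, ha]

-- str.count of a single char is List.count
lemma count_go_single : ∀ (fuel : Nat) (l : List Char) (acc : Nat), l.length ≤ fuel →
    PySem.Chars.count.go ['c'] fuel l acc = acc + l.count 'c' := by
  intro fuel
  induction fuel with
  | zero =>
      intro l acc h
      cases l with
      | nil => simp [PySem.Chars.count.go]
      | cons a t => simp at h
  | succ n ih =>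
      intro l acc h
      cases l with
      | nil => simp [PySem.Chars.count.go]
      | cons a t =>
          simp only [PySem.Chars.count.go, List.isPrefixOf, List.count_cons]
          by_cases hc : a = 'c'
          · simp [hc, ih t (acc + 1) (by simpa using h)]; omega
          · simp [hc, Ne.symm hc, ih t acc (by simpa using h)]

lemma count_single (l : List Char) : PySem.Chars.count l ['c'] = l.count 'c' := by
  simpa using count_go_single l.length l 0 le_rfl

-- A's loop, characterised by B's data: the early return fires iff the flag string starts
-- with 3-cc consonant flags or contains 'ccc' later; otherwise the consonant count decides.
lemma repl_prefix_mono {j k : Nat} (h : j ≤ k) {L : List Char} :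
    List.replicate k 'c' <+: L → List.replicate j 'c' <+: L := by
  intro hk
  exact List.IsPrefix.trans (by rw [List.prefix_replicate_iff]; simp [h]) hk

lemma not_repl_prefix_v {k : Nat} (hk : 1 ≤ k) (L : List Char) :
    ¬ (List.replicate k 'c' <+: 'v' :: L) := by
  intro hp
  obtain ⟨m, rfl⟩ : ∃ m, k = m + 1 := ⟨k - 1, by omega⟩
  rw [List.replicate_succ, List.cons_prefix_cons] at hp
  exact absurd hp.1 (by decide)

lemma ccc_infix_v (L : List Char) : (['c','c','c'] <:+: 'v' :: L) ↔ (['c','c','c'] <:+: L) := by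
  rw [List.infix_cons_iff]
  constructor
  · rintro (hp | hi)
    · exact absurd (List.cons_prefix_cons.mp hp).1 (by decide)
    · exact hi
  · exact Or.inr

lemma ccc_infix_c (L : List Char) :
    (['c','c','c'] <:+: 'c' :: L) ↔ (List.replicate 2 'c' <+: L) ∨ (['c','c','c'] <:+: L) := by
  rw [List.infix_cons_iff]
  constructor
  · rintro (hp | hi)
    · exact Or.inl (by simpa [List.cons_prefix_cons] using (List.cons_prefix_cons.mp hp).2)
    · exact Or.inr hi
  · rintro (hp | hi)
    · exact Or.inl (List.cons_prefix_cons.mpr ⟨rfl, by simpa [List.replicate] using hp⟩)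
    · exact Or.inr hi

lemma goA_characterize (n : Int) (xs : List Char) :
    ∀ (cc cons : Int), 0 ≤ cc → cc ≤ 2 →
    goA n xs cc cons =
      (if (List.replicate (3 - cc.toNat) 'c' <+: pvF xs) ∨ (['c','c','c'] <:+: pvF xs)
       then true
       else decide (cons + ((pvF xs).count 'c' : Int) > n - (cons + ((pvF xs).count 'c' : Int)))) := by
  induction xs with
  | nil =>
      intro cc cons h0 h2
      have h31 : 3 - cc.toNat = (2 - cc.toNat) + 1 := by omega
      simp [goA, pvF, h31, List.replicate_succ]
  | cons x xs ih =>
      intro cc cons h0 h2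
      by_cases ha : PySem.Chars.isalpha x = true
      · by_cases hv : PySem.Chars.isIn [x] pvVowels = true
        · -- vowel: consecutive counter resets, consonant count unchanged
          have hfl : pvFlag x = 'v' := by simp [pvFlag, hv]
          rw [pvF_cons_alpha xs ha, hfl]
          rw [show goA n (x :: xs) cc cons = goA n xs 0 cons by simp [goA, ha, hv],
            ih 0 cons le_rfl (by norm_num)]
          refine if_congr ?_ rfl (decide_eq_decide.mpr (by simp))
          constructor
          · rintro (hp | hi)
            · exact Or.inr ((ccc_infix_v (pvF xs)).mpr
                ((show List.replicate (3 - (0:Int).toNat) 'c' = ['c','c','c'] by decide) ▸ hp).isInfix)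
            · exact Or.inr ((ccc_infix_v (pvF xs)).mpr hi)
          · rintro (hp | hi)
            · exact absurd hp (not_repl_prefix_v (by omega) (pvF xs))
            · exact Or.inr ((ccc_infix_v (pvF xs)).mp hi)
        · -- consonant
          have hfl : pvFlag x = 'c' := by simp [pvFlag, hv]
          rw [pvF_cons_alpha xs ha, hfl]
          by_cases h3 : cc + 1 = 3
          · -- third consecutive consonant: A returns True; the prefix condition holds
            have hcc2 : cc = 2 := by omega
            subst hcc2
            have hrep : List.replicate (3 - (2:Int).toNat) 'c' <+: 'c' :: pvF xs := by
              have : List.replicate (3 - (2:Int).toNat) 'c' = ['c'] := by decide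
              rw [this]
              exact List.cons_prefix_cons.mpr ⟨rfl, List.nil_prefix⟩
            rw [if_pos (Or.inl hrep)]
            simp [goA, ha, hv]
          · have hcc1 : cc ≤ 1 := by omega
            rw [show goA n (x :: xs) cc cons = goA n xs (cc + 1) (cons + 1) by
                simp [goA, ha, hv, h3],
              ih (cc + 1) (cons + 1) (by omega) (by omega)]
            have htn : 3 - cc.toNat = (3 - (cc + 1).toNat) + 1 := by omega
            have hk2 : 3 - (cc + 1).toNat ≤ 2 := by omega
            refine if_congr ?_ rfl (decide_eq_decide.mpr (by push_cast [List.count_cons_self]; omega))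
            rw [htn, List.replicate_succ, List.cons_prefix_cons, ccc_infix_c]
            constructor
            · rintro (hp | hi)
              · exact Or.inl ⟨rfl, hp⟩
              · exact Or.inr (Or.inr hi)
            · rintro (⟨-, hp⟩ | hp2 | hi)
              · exact Or.inl hp
              · exact Or.inl (repl_prefix_mono hk2 hp2)
              · exact Or.inr hi
      · -- not alphabetic: transparent to both counter and flags
        rw [pvF_cons_not_alpha xs ha,
          show goA n (x :: xs) cc cons = goA n xs cc cons by simp [goA, ha]]
        exact ih cc cons h0 h2

theorem is_hard_word_spec_aux : ∀ (word : String), is_hard_word word = is_hard_word_alt word := by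
  intro word
  rw [is_hard_word, goA_characterize _ _ 0 0 le_rfl (by norm_num)]
  by_cases h : (['c','c','c'] <:+: pvF word.toList)
  · rw [if_pos (Or.inr h)]
    have hin : PySem.Chars.isIn ['c','c','c'] ((word.toList.filter PySem.Chars.isalpha).map pvFlag) = true :=
      (PySem.Chars.isIn_iff_infix _ _).mpr h
    simp [is_hard_word_alt, hin]
  · have hni : ¬ (List.replicate (3 - (0:Int).toNat) 'c' <+: pvF word.toList ∨ ['c','c','c'] <:+: pvF word.toList) := by
      rintro (hp | hi)
      · exact h (((show List.replicate (3 - (0:Int).toNat) 'c' = ['c','c','c'] by decide) ▸ hp).isInfix)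
      · exact h hi
    rw [if_neg hni]
    have hin : PySem.Chars.isIn ['c','c','c'] ((word.toList.filter PySem.Chars.isalpha).map pvFlag) = false :=
      (PySem.Chars.isIn_eq_false_iff _ _).mpr h
    simp [is_hard_word_alt, hin, count_single, pvF]

-- ===== VERDICT (by name: the statement is the Claim_ definition above) =====
theorem is_hard_word_spec : Claim_equal_is_hard_word := by
  intro word _
  exact (is_hard_word_spec_aux word).symm ▸ rfl
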